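-- pv_equiv track=rewrite | github.com/HoongTae/BackJoon | Function/4673_boj.py | not_self_num
-- ===== SOURCE A (Python) =====
-- def not_self_num(n):
--     self = n
--     remainder = n
--     while True:
--         self += remainder % 10
--         remainder //= 10
--         if remainder == 0:
--             break
--     return self
-- ===== SOURCE B (Python) =====
-- def not_self_num(n):
--     return n + sum(int(c) for c in str(n))
-- ===== Notes on version B (the rewrite author's own statement) =====
-- stated objective: simpler
-- what changed: B computes the digit sum in one expression over the characters of str(n) instead of A's while-loop peeling off decimal digits with modulo and floor division, mutating a running remainder.
import Mathlib
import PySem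

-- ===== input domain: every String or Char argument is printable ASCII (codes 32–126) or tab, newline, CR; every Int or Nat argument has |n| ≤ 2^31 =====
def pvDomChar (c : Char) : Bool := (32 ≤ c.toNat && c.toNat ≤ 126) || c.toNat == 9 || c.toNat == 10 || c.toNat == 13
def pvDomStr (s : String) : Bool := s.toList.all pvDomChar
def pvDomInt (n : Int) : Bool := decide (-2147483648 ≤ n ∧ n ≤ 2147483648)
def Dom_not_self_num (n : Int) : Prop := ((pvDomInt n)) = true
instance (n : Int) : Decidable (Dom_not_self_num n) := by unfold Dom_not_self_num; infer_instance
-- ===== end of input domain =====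

-- B computes n plus its digit sum by summing int(c) over the characters of str(n),
-- instead of A's while-loop peeling off decimal digits arithmetically (objective: simpler).

-- ===== PORT A =====
-- A's do-while loop: add the last decimal digit, floor-divide the remainder, stop at zero.
-- The second guard (0 < r' ∧ r' < r) only makes the recursion total: whenever 0 < r' it
-- holds automatically; for r < 0 the Python loop never terminates (excluded by Pre_).
def notSelfLoop (s r : Int) : Int :=
  let s' := s + PySem.Int.mod r 10
  let r' := PySem.Int.floordiv r 10
  if r' = 0 then s'
  else if _h : 0 < r' ∧ r' < r then notSelfLoop s' r'
  else s'
termination_by r.toNat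
decreasing_by omega

def not_self_num (n : Int) : Int := notSelfLoop n n

-- ===== PORT B =====
def not_self_num_alt (n : Int) : Int :=
  n + (PySem.Int.toStr n).toList.foldl
        (fun acc c => acc + ((PySem.Int.ofChars? [c]).getD 0)) 0

-- ===== PRECONDITION & SPEC =====
-- Pre_ excludes negative n, on which Python A loops forever (the remainder never reaches zero).
def Pre_not_self_num (n : Int) : Prop := 0 ≤ n
instance (n : Int) : Decidable (Pre_not_self_num n) := by unfold Pre_not_self_num; infer_instance
def pvWitness_not_self_num : Int := (42)

def Spec_not_self_num (n : Int) (out : Int) : Prop := out = not_self_num_alt n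
instance (n : Int) (out : Int) : Decidable (Spec_not_self_num n out) := by unfold Spec_not_self_num; infer_instance

-- ===== CLAIM (what is proved, stated in full; the proofs are below) =====
def Claim_equal_not_self_num : Prop := ∀ (n : Int), Dom_not_self_num n → Pre_not_self_num n → Spec_not_self_num n (not_self_num n)

-- ===== LEMMAS AND PROOFS =====

-- the mathematical digit sum both programs compute
def digsum (m : Nat) : Nat :=
  if h : m < 10 then m else m % 10 + digsum (m / 10)
termination_by m
decreasing_by exact Nat.div_lt_self (by omega) (by omega)

-- the int value of a single character, as B reads it
def chVal (c : Char) : Int := (PySem.Int.ofChars? [c]).getD 0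

theorem chVal_digitChar (d : Nat) (hd : d < 10) : chVal (Nat.digitChar d) = (d : Int) := by
  interval_cases d <;> decide

theorem loop_eq_digsum : ∀ (m : Nat) (s : Int), notSelfLoop s (m : Int) = s + (digsum m : Int) := by
  intro m
  induction m using Nat.strong_induction_on with
  | _ m ih =>
    intro s
    rw [notSelfLoop]
    have hmod : PySem.Int.mod (m : Int) 10 = ((m % 10 : Nat) : Int) := by
      exact_mod_cast PySem.Int.mod_natCast m 10
    have hdiv : PySem.Int.floordiv (m : Int) 10 = ((m / 10 : Nat) : Int) := by
      exact_mod_cast PySem.Int.floordiv_natCast m 10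
    simp only [hmod, hdiv]
    by_cases h0 : m / 10 = 0
    · have hm10 : m < 10 := by omega
      have hz : ((m / 10 : Nat) : Int) = 0 := by exact_mod_cast h0
      rw [if_pos hz, digsum, dif_pos hm10]
      omega
    · have hm10 : ¬ m < 10 := by omega
      have hpos : (0 : Int) < ((m / 10 : Nat) : Int) := by exact_mod_cast Nat.pos_of_ne_zero h0
      have hlt : ((m / 10 : Nat) : Int) < (m : Int) := by
        have : m / 10 < m := Nat.div_lt_self (by omega) (by omega)
        exact_mod_cast this
      rw [if_neg (by exact_mod_cast h0), dif_pos ⟨hpos, hlt⟩]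
      rw [ih (m / 10) (Nat.div_lt_self (by omega) (by omega))]
      conv_rhs => rw [digsum]
      rw [dif_neg hm10]
      push_cast
      ring

theorem foldl_chVal (l : List Char) (i : Int) :
    l.foldl (fun acc c => acc + ((PySem.Int.ofChars? [c]).getD 0)) i = i + (l.map chVal).sum := by
  induction l generalizing i with
  | nil => simp
  | cons c t ih =>
    rw [List.foldl_cons, ih]
    simp [chVal, add_assoc]

theorem core_sum : ∀ (f n : Nat) (acc : List Char), n < f →
    ((Nat.toDigitsCore 10 f n acc).map chVal).sum = (digsum n : Int) + ((acc.map chVal).sum) := by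
  intro f
  induction f with
  | zero => intro n acc h; omega
  | succ f ih =>
    intro n acc h
    rw [Nat.toDigitsCore]
    by_cases h0 : n / 10 = 0
    · have hn10 : n < 10 := by omega
      simp only [h0, if_true, List.map_cons, List.sum_cons]
      rw [chVal_digitChar (n % 10) (Nat.mod_lt _ (by omega)), digsum, dif_pos hn10]
      omega
    · rw [if_neg h0]
      have hlt : n / 10 < f := by
        have := Nat.div_lt_self (Nat.pos_of_ne_zero (by omega)) (by omega : 1 < 10)
        omega
      rw [ih (n / 10) (Nat.digitChar (n % 10) :: acc) hlt]
      simp only [List.map_cons, List.sum_cons]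
      rw [chVal_digitChar (n % 10) (Nat.mod_lt _ (by omega))]
      conv_rhs => rw [digsum]
      rw [dif_neg (by omega : ¬ n < 10)]
      push_cast
      ring

theorem alt_eq_digsum (n : Int) (hn : 0 ≤ n) : not_self_num_alt n = n + (digsum n.toNat : Int) := by
  unfold not_self_num_alt
  rw [foldl_chVal]
  have hneg : ¬ n < 0 := by omega
  have : (PySem.Int.toStr n).toList = Nat.toDigits 10 n.toNat := by
    rw [PySem.Int.toList_toStr]
    simp [PySem.Int.toChars, hneg]
  rw [this, Nat.toDigits]
  rw [core_sum (n.toNat + 1) n.toNat [] (by omega)]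
  simp

-- ===== VERDICT (by name: the statement is the Claim_ definition above) =====
theorem not_self_num_spec : Claim_equal_not_self_num := by
  intro n _ hpre
  unfold Pre_not_self_num at hpre
  unfold Spec_not_self_num not_self_num
  have h : n = ((n.toNat : Nat) : Int) := by omega
  rw [alt_eq_digsum n hpre]
  conv_lhs => rw [h]
  rw [loop_eq_digsum n.toNat, ← h]
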